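-- pv_equiv track=rewrite | github.com/johnmica1993-svg/findy-buscador | scripts/procesar_final.py | campo
-- ===== SOURCE A (Python) =====
-- def campo(col):
--     c = col.lower().replace(' ','').replace('_','')
--     if 'cups' in c: return 'cups'
--     if any(x in c for x in ['dni','nif','nie']): return 'dni'
--     if any(x in c for x in ['nombre','titular']): return 'nombre'
--     if any(x in c for x in ['direccion','calle','domicilio']): return 'direccion'
--     if 'campan' in c or 'comercializador' in c: return 'campana'
--     if 'estado' in c or 'status' in c: return 'estado'
--     return None
-- ===== SOURCE B (Python) =====
-- KEYWORDS = [
--     ('cups', 'cups'),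
--     ('dni', 'dni'), ('nif', 'dni'), ('nie', 'dni'),
--     ('nombre', 'nombre'), ('titular', 'nombre'),
--     ('direccion', 'direccion'), ('calle', 'direccion'), ('domicilio', 'direccion'),
--     ('campan', 'campana'), ('comercializador', 'campana'),
--     ('estado', 'estado'), ('status', 'estado'),
-- ]
-- PRIORITY = ['cups', 'dni', 'nombre', 'direccion', 'campana', 'estado']
--
-- def campo(col):
--     c = col.lower().replace(' ', '').replace('_', '')
--     # single left-to-right scan: at each position collect every category whose
--     # keyword starts there, then report the highest-priority category found
--     matched = set()
--     for i in range(len(c)):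
--         suffix = c[i:]
--         for kw, lab in KEYWORDS:
--             if suffix.startswith(kw):
--                 matched.add(lab)
--     for lab in PRIORITY:
--         if lab in matched:
--             return lab
--     return None
-- ===== Notes on version B (the rewrite author's own statement) =====
-- stated objective: alternative
-- what changed: A tests each rule's keywords as substrings in a fixed if-chain with short-circuit; B instead makes one left-to-right scan over the normalized string, collecting into a set every category whose keyword starts at the current position, and then picks the first category of a priority list present in that set.
import Mathlib
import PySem

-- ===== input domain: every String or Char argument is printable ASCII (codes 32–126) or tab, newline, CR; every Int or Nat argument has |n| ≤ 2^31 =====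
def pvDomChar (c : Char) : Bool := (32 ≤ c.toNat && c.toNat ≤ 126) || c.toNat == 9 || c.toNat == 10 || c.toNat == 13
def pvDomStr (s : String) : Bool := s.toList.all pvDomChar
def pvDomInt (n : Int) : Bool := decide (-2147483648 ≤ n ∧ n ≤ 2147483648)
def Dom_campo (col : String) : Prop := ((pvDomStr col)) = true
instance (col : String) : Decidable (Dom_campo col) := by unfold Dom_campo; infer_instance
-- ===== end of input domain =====

-- B replaces A's chain of substring tests by a different algorithm: a single left-to-right
-- position scan that collects every matched category into a set, then a priority pass
-- picking the first present category (alternative decomposition, same cost).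

-- ===== PORT A =====
def campo (col : String) : Option String :=
  let c := PySem.Str.replace (PySem.Str.replace (PySem.Str.lower col) " " "") "_" ""
  if PySem.Str.isIn "cups" c then some "cups"
  else if ["dni", "nif", "nie"].any (fun x => PySem.Str.isIn x c) then some "dni"
  else if ["nombre", "titular"].any (fun x => PySem.Str.isIn x c) then some "nombre"
  else if ["direccion", "calle", "domicilio"].any (fun x => PySem.Str.isIn x c) then some "direccion"
  else if PySem.Str.isIn "campan" c || PySem.Str.isIn "comercializador" c then some "campana"
  else if PySem.Str.isIn "estado" c || PySem.Str.isIn "status" c then some "estado"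
  else none

-- ===== PORT B =====
def campoKeywords : List (String × String) :=
  [ ("cups", "cups")
  , ("dni", "dni"), ("nif", "dni"), ("nie", "dni")
  , ("nombre", "nombre"), ("titular", "nombre")
  , ("direccion", "direccion"), ("calle", "direccion"), ("domicilio", "direccion")
  , ("campan", "campana"), ("comercializador", "campana")
  , ("estado", "estado"), ("status", "estado") ]

def campoPriority : List String := ["cups", "dni", "nombre", "direccion", "campana", "estado"]

-- the scan: at each position i, add every category whose keyword starts at i
def campoMatched (c : String) : PySem.Set String :=
  (PySem.List.pyRange 0 (PySem.Str.len c)).foldl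
    (fun m i =>
      let suffix := PySem.Str.slice c (some i) none
      campoKeywords.foldl
        (fun m kv => if PySem.Str.startswith suffix kv.1 then PySem.Set.add m kv.2 else m) m)
    PySem.Set.empty

-- the priority pass: first category of PRIORITY present in the set
def campoPick (m : PySem.Set String) : List String → Option String
  | [] => none
  | lab :: rest => if PySem.Set.contains m lab then some lab else campoPick m rest

def campo_alt (col : String) : Option String :=
  let c := PySem.Str.replace (PySem.Str.replace (PySem.Str.lower col) " " "") "_" ""
  campoPick (campoMatched c) campoPriority

-- ===== PRECONDITION & SPEC =====
def Spec_campo (col : String) (out : Option String) : Prop := out = campo_alt col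
instance (col : String) (out : Option String) : Decidable (Spec_campo col out) := by unfold Spec_campo; infer_instance

-- ===== CLAIM (what is proved, stated in full; the proofs are below) =====
def Claim_equal_campo : Prop := ∀ (col : String), Dom_campo col → Spec_campo col (campo col)

-- ===== LEMMAS AND PROOFS =====

-- membership after the inner fold (over the keyword table) at one position
theorem campo_inner_mem (ks : List (String × String)) (s : String) (m : List String) (lab : String) :
    lab ∈ ks.foldl
      (fun m kv => if PySem.Str.startswith s kv.1 then PySem.Set.add m kv.2 else m) m ↔
    lab ∈ m ∨ ∃ kv ∈ ks, PySem.Str.startswith s kv.1 = true ∧ kv.2 = lab := by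
  induction ks generalizing m with
  | nil => simp
  | cons kv ks ih =>
    simp only [List.foldl_cons, List.mem_cons]
    rw [ih]
    by_cases h : PySem.Str.startswith s kv.1 = true
    · simp only [h, if_true, PySem.Set.mem_add]
      constructor
      · rintro (⟨hm | he⟩ | ⟨kv', hkv', hs', he'⟩)
        · exact Or.inl hm
        · exact Or.inr ⟨kv, Or.inl rfl, h, he.symm⟩
        · exact Or.inr ⟨kv', Or.inr hkv', hs', he'⟩
      · rintro (hm | ⟨kv', (rfl | hkv'), hs', he'⟩)
        · exact Or.inl (Or.inl hm)
        · exact Or.inl (Or.inr he'.symm)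
        · exact Or.inr ⟨kv', hkv', hs', he'⟩
    · simp only [h]
      constructor
      · rintro (hm | ⟨kv', hkv', hs', he'⟩)
        · exact Or.inl hm
        · exact Or.inr ⟨kv', Or.inr hkv', hs', he'⟩
      · rintro (hm | ⟨kv', (rfl | hkv'), hs', he'⟩)
        · exact Or.inl hm
        · exact absurd hs' h
        · exact Or.inr ⟨kv', hkv', hs', he'⟩

-- membership after the outer fold (over positions)
theorem campo_outer_mem (c : String) (is : List Int) (m : List String) (lab : String) :
    lab ∈ is.foldl
      (fun m i =>
        let suffix := PySem.Str.slice c (some i) none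
        campoKeywords.foldl
          (fun m kv => if PySem.Str.startswith suffix kv.1 then PySem.Set.add m kv.2 else m) m) m ↔
    lab ∈ m ∨ ∃ i ∈ is, ∃ kv ∈ campoKeywords,
      PySem.Str.startswith (PySem.Str.slice c (some i) none) kv.1 = true ∧ kv.2 = lab := by
  induction is generalizing m with
  | nil => simp
  | cons i is ih =>
    simp only [List.foldl_cons, List.mem_cons]
    rw [ih, campo_inner_mem]
    constructor
    · rintro (⟨hm | ⟨kv, hkv, hs, he⟩⟩ | ⟨i', hi', rest⟩)
      · exact Or.inl hm
      · exact Or.inr ⟨i, Or.inl rfl, kv, hkv, hs, he⟩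
      · exact Or.inr ⟨i', Or.inr hi', rest⟩
    · rintro (hm | ⟨i', (rfl | hi'), rest⟩)
      · exact Or.inl (Or.inl hm)
      · exact Or.inl (Or.inr rest)
      · exact Or.inr ⟨i', hi', rest⟩

-- a nonempty keyword occurs somewhere in the scanned range iff it is a substring
theorem campo_occ_iff (c kw : String) (hkw : kw.toList ≠ []) :
    (∃ i ∈ PySem.List.pyRange 0 (PySem.Str.len c),
       PySem.Str.startswith (PySem.Str.slice c (some i) none) kw = true) ↔
    PySem.Str.isIn kw c = true := by
  rw [PySem.Str.isIn_eq, ← PySem.Chars.exists_prefix_drop_iff_isIn]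
  constructor
  · rintro ⟨i, hi, hs⟩
    rw [PySem.List.mem_pyRange_one] at hi
    obtain ⟨h0, _⟩ := hi
    rw [PySem.Str.startswith_eq, PySem.Chars.startswith_iff, PySem.Str.toList_slice] at hs
    refine ⟨i.toNat, ?_⟩
    have : (i.toNat : Int) = i := Int.toNat_of_nonneg h0
    rw [show PySem.Chars.slice c.toList (some i) none = c.toList.drop i.toNat by
      rw [← this]; exact PySem.List.slice_from_natCast c.toList i.toNat] at hs
    exact hs
  · rintro ⟨j, hj⟩
    have hjlt : j < c.toList.length := by
      by_contra h
      rw [List.drop_eq_nil_of_le (by omega)] at hj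
      exact hkw (List.prefix_nil.mp hj)
    refine ⟨(j : Int), ?_, ?_⟩
    · rw [PySem.List.mem_pyRange_one, PySem.Str.len_eq]
      constructor <;> [positivity; exact_mod_cast hjlt]
    · rw [PySem.Str.startswith_eq, PySem.Chars.startswith_iff, PySem.Str.toList_slice]
      rw [show PySem.Chars.slice c.toList (some (j : Int)) none = c.toList.drop j from
        PySem.List.slice_from_natCast c.toList j]
      exact hj

-- what the matched set contains
theorem campo_matched_mem (c lab : String) :
    lab ∈ campoMatched c ↔
    ∃ kv ∈ campoKeywords, PySem.Str.isIn kv.1 c = true ∧ kv.2 = lab := by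
  unfold campoMatched
  rw [campo_outer_mem]
  have hne : ∀ kv ∈ campoKeywords, kv.1.toList ≠ [] := by decide
  constructor
  · rintro (hm | ⟨i, hi, kv, hkv, hs, he⟩)
    · simp [PySem.Set.empty] at hm
    · exact ⟨kv, hkv, (campo_occ_iff c kv.1 (hne kv hkv)).mp ⟨i, hi, hs⟩, he⟩
  · rintro ⟨kv, hkv, hin, he⟩
    obtain ⟨i, hi, hs⟩ := (campo_occ_iff c kv.1 (hne kv hkv)).mpr hin
    exact Or.inr ⟨i, hi, kv, hkv, hs, he⟩

theorem campo_contains_iff (c lab : String) :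
    PySem.Set.contains (campoMatched c) lab = true ↔
    ∃ kv ∈ campoKeywords, PySem.Str.isIn kv.1 c = true ∧ kv.2 = lab := by
  exact (List.contains_iff_mem (as := campoMatched c) (a := lab)).trans (campo_matched_mem c lab)

theorem campo_contains_cups (c : String) :
    PySem.Set.contains (campoMatched c) "cups" = PySem.Str.isIn "cups" c := by
  rw [Bool.eq_iff_iff, campo_contains_iff]
  simp [campoKeywords]

theorem campo_contains_dni (c : String) :
    PySem.Set.contains (campoMatched c) "dni" =
      (PySem.Str.isIn "dni" c || (PySem.Str.isIn "nif" c || PySem.Str.isIn "nie" c)) := by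
  rw [Bool.eq_iff_iff, campo_contains_iff]
  simp [campoKeywords]

theorem campo_contains_nombre (c : String) :
    PySem.Set.contains (campoMatched c) "nombre" =
      (PySem.Str.isIn "nombre" c || PySem.Str.isIn "titular" c) := by
  rw [Bool.eq_iff_iff, campo_contains_iff]
  simp [campoKeywords]

theorem campo_contains_direccion (c : String) :
    PySem.Set.contains (campoMatched c) "direccion" =
      (PySem.Str.isIn "direccion" c || (PySem.Str.isIn "calle" c || PySem.Str.isIn "domicilio" c)) := by
  rw [Bool.eq_iff_iff, campo_contains_iff]
  simp [campoKeywords]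

theorem campo_contains_campana (c : String) :
    PySem.Set.contains (campoMatched c) "campana" =
      (PySem.Str.isIn "campan" c || PySem.Str.isIn "comercializador" c) := by
  rw [Bool.eq_iff_iff, campo_contains_iff]
  simp [campoKeywords]

theorem campo_contains_estado (c : String) :
    PySem.Set.contains (campoMatched c) "estado" =
      (PySem.Str.isIn "estado" c || PySem.Str.isIn "status" c) := by
  rw [Bool.eq_iff_iff, campo_contains_iff]
  simp [campoKeywords]

-- ===== VERDICT (by name: the statement is the Claim_ definition above) =====
theorem campo_spec : Claim_equal_campo := by
  intro col _
  unfold Spec_campo campo campo_alt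
  simp only []
  set c := PySem.Str.replace (PySem.Str.replace (PySem.Str.lower col) " " "") "_" "" with hc
  simp only [campoPriority, campoPick, campo_contains_cups, campo_contains_dni,
    campo_contains_nombre, campo_contains_direccion, campo_contains_campana,
    campo_contains_estado, List.any_cons, List.any_nil, Bool.or_false]
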